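-- pv_equiv track=rewrite | github.com/wrhm/advent_of_code | 2023/day21.py | solve_pt1
-- ===== SOURCE A (Python) =====
-- def solve_pt1(data, steps):
--     srow, scol = 0, 0
--     w, h = len(data[0]), len(data)
--     for r in range(h):
--         for c in range(w):
--             if data[r][c] == 'S':
--                 srow, scol = r, c
--                 r, c = h, w
--                 break
--     q = {(srow, scol)}
--     for _ in range(steps):
--         next = set()
--         for (r, c) in q:
--             for (dr, dc) in [(-1, 0), (1, 0), (0, -1), (0, 1)]:
--                 mr, mc = r+dr, c+dc
--                 if 0 <= mr < h and 0 <= mc < w and data[mr][mc] != '#':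
--                     next.add((mr, mc))
--         q = next
--     return len(q)
-- ===== SOURCE B (Python) =====
-- def solve_pt1(data, steps):
--     # "Pull" (gather) formulation: instead of expanding each frontier cell's
--     # neighbours into a new set (scatter), keep a dense boolean grid and, each
--     # step, recompute every cell from its neighbours in one full-grid pass.
--     h = len(data)
--     w = len(data[0])
--     grid = [row[:w] for row in data]
--     srow = scol = 0
--     for r in range(h):
--         c = grid[r].find('S')
--         if c != -1:
--             srow, scol = r, c
--     cur = [[r == srow and c == scol for c in range(w)] for r in range(h)]
--     for _ in range(steps):
--         cur = [[grid[r][c] != '#'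
--                 and ((r > 0 and cur[r - 1][c])
--                      or (r + 1 < h and cur[r + 1][c])
--                      or (c > 0 and cur[r][c - 1])
--                      or (c + 1 < w and cur[r][c + 1]))
--                 for c in range(w)]
--                for r in range(h)]
--     return sum(row.count(True) for row in cur)
-- ===== Notes on version B (the rewrite author's own statement) =====
-- stated objective: alternative
-- what changed: A expands each frontier cell of a Python set into a new set every step (scatter); B keeps a dense boolean grid and recomputes every cell from its four neighbours in one full-grid pass per step (gather), finishing with a row count sum.
-- intended difference: On grids whose first row is empty (width 0) with steps <= 0, A returns 1 (it counts the phantom start cell (0,0) that the grid does not contain) while B returns 0, the number of reachable cells of a grid that has no cells, which is the intended count. — e.g. on solve_pt1([""], 0): A returns 1, B returns 0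
-- outside the precondition, e.g. on solve_pt1(['###', 'S', '###', '#S#'], 1): A returns 0, B raises IndexError
import Mathlib
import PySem

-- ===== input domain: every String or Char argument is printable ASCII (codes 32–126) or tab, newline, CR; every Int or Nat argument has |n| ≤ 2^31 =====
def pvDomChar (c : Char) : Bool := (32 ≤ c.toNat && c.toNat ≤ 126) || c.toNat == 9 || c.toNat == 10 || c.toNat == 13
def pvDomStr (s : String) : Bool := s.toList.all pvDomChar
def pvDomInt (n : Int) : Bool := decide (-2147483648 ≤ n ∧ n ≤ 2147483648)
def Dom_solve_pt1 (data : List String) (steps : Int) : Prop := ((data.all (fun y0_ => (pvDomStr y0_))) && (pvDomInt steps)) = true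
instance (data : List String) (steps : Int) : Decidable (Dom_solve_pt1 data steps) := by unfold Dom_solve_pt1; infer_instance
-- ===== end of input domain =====

-- B replaces A's per-step frontier-set expansion (scatter into a Python set) by a dense
-- boolean grid recomputed cell-by-cell from its neighbours each step (gather); same cost
-- class, different data structure and traversal ("alternative", not claimed faster).

-- ===== PORT A =====
-- inner 'for c in range(w): if data[r][c] == 'S': … break' (the dead 'r, c = h, w' has no effect on the loops)
def pvScanRowA (data : List String) (r : Int) : List Int → Int × Int → Int × Int
  | [], st => st
  | c :: rest, st =>
    if PySem.Str.pyGet? (PySem.List.pyGetD data r "") c = some 'S' then (r, c)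
    else pvScanRowA data r rest st

def pvDirs : List (Int × Int) := [(-1, 0), (1, 0), (0, -1), (0, 1)]

-- one step: next = set(); for (r,c) in q: for (dr,dc) in dirs: …
def pvStepA (data : List String) (h w : Int) (q : PySem.Set (Int × Int)) : PySem.Set (Int × Int) :=
  q.foldl (fun nxt p =>
    pvDirs.foldl (fun nxt d =>
      if 0 ≤ p.1 + d.1 ∧ p.1 + d.1 < h ∧ 0 ≤ p.2 + d.2 ∧ p.2 + d.2 < w ∧
         PySem.Str.pyGet? (PySem.List.pyGetD data (p.1 + d.1) "") (p.2 + d.2) ≠ some '#'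
      then PySem.Set.add nxt (p.1 + d.1, p.2 + d.2) else nxt) nxt) PySem.Set.empty

def solve_pt1 (data : List String) (steps : Int) : Int :=
  let h : Int := data.length
  let w : Int := PySem.Str.len (PySem.List.pyGetD data 0 "")
  let st := (PySem.List.pyRange 0 h 1).foldl
      (fun st r => pvScanRowA data r (PySem.List.pyRange 0 w 1) st) ((0 : Int), (0 : Int))
  let q := (PySem.List.pyRange 0 steps 1).foldl
      (fun q _ => pvStepA data h w q) (PySem.Set.add PySem.Set.empty st)
  PySem.Set.len q

-- ===== PORT B =====
-- one step: full-grid pass, each cell computed from its four neighbours (gather)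
def pvStepB (grid : List (List Char)) (h w : Int) (cur : List (List Bool)) : List (List Bool) :=
  (PySem.List.pyRange 0 h 1).map (fun r =>
    (PySem.List.pyRange 0 w 1).map (fun c =>
      (PySem.List.pyGetD (PySem.List.pyGetD grid r []) c ' ' != '#') &&
      ((decide (0 < r) && PySem.List.pyGetD (PySem.List.pyGetD cur (r - 1) []) c false) ||
       (decide (r + 1 < h) && PySem.List.pyGetD (PySem.List.pyGetD cur (r + 1) []) c false) ||
       (decide (0 < c) && PySem.List.pyGetD (PySem.List.pyGetD cur r []) (c - 1) false) ||
       (decide (c + 1 < w) && PySem.List.pyGetD (PySem.List.pyGetD cur r []) (c + 1) false))))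

def solve_pt1_alt (data : List String) (steps : Int) : Int :=
  let h : Int := data.length
  let w : Int := PySem.Str.len (PySem.List.pyGetD data 0 "")
  -- grid = [row[:w] for row in data]; w ≥ 0 so row[:w] is exactly 'take'
  let grid : List (List Char) := data.map (fun row => row.toList.take w.toNat)
  let st := (PySem.List.pyRange 0 h 1).foldl (fun st r =>
      let c := PySem.Chars.find (PySem.List.pyGetD grid r []) ['S']
      if c ≠ -1 then (r, c) else st) ((0 : Int), (0 : Int))
  let cur0 := (PySem.List.pyRange 0 h 1).map (fun r =>
      (PySem.List.pyRange 0 w 1).map (fun c => decide (r = st.1 ∧ c = st.2)))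
  let fin := (PySem.List.pyRange 0 steps 1).foldl (fun cur _ => pvStepB grid h w cur) cur0
  (fin.map (fun row => (row.count true : Int))).sum

-- ===== PRECONDITION & SPEC =====
-- Pre_ excludes empty input (data[0] raises IndexError) and ragged inputs whose rows are
-- shorter than the first row: there A indexes missing cells (IndexError) on all but
-- degenerate runs, and B's full-grid pass raises whenever it runs a step.
def Pre_solve_pt1 (data : List String) (steps : Int) : Prop :=
  data ≠ [] ∧ ∀ s ∈ data, (PySem.List.pyGetD data 0 "").toList.length ≤ s.toList.length
instance (data : List String) (steps : Int) : Decidable (Pre_solve_pt1 data steps) := by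
  unfold Pre_solve_pt1; infer_instance

def pvWitness_solve_pt1 : List String × Int := (["S.", "#."], 3)

-- On zero-width grids (first row empty) with steps ≤ 0, A returns 1 — it counts the phantom
-- start cell (0,0) that the grid does not contain — while B returns 0, the number of cells
-- of a grid with no cells, which is the intended count.
def D_solve_pt1 (data : List String) (steps : Int) : Prop :=
  (PySem.List.pyGetD data 0 "").toList.length = 0 ∧ steps ≤ 0
instance (data : List String) (steps : Int) : Decidable (D_solve_pt1 data steps) := by
  unfold D_solve_pt1; infer_instance

def Spec_solve_pt1 (data : List String) (steps : Int) (out : Int) : Prop :=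
  ¬ D_solve_pt1 data steps → out = solve_pt1_alt data steps
instance (data : List String) (steps : Int) (out : Int) : Decidable (Spec_solve_pt1 data steps out) := by
  unfold Spec_solve_pt1; infer_instance

def pvDiffWitness_solve_pt1 : List String × Int := ([""], 0)
def pvDiffWitnessOut_solve_pt1 : Int × Int := (1, 0)

-- ===== CLAIM (what is proved, stated in full; the proofs are below) =====
def Claim_unchanged_solve_pt1 : Prop := ∀ (data : List String) (steps : Int),
  Dom_solve_pt1 data steps → Pre_solve_pt1 data steps → Spec_solve_pt1 data steps (solve_pt1 data steps)
def Claim_changed_solve_pt1 : Prop :=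
  Dom_solve_pt1 (pvDiffWitness_solve_pt1.1) (pvDiffWitness_solve_pt1.2) ∧
  Pre_solve_pt1 (pvDiffWitness_solve_pt1.1) (pvDiffWitness_solve_pt1.2) ∧
  D_solve_pt1 (pvDiffWitness_solve_pt1.1) (pvDiffWitness_solve_pt1.2) ∧
  solve_pt1 (pvDiffWitness_solve_pt1.1) (pvDiffWitness_solve_pt1.2) = pvDiffWitnessOut_solve_pt1.1 ∧
  solve_pt1_alt (pvDiffWitness_solve_pt1.1) (pvDiffWitness_solve_pt1.2) = pvDiffWitnessOut_solve_pt1.2 ∧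
  pvDiffWitnessOut_solve_pt1.1 ≠ pvDiffWitnessOut_solve_pt1.2
def Claim_exact_solve_pt1 : Prop := ∀ (data : List String) (steps : Int),
  Dom_solve_pt1 data steps → Pre_solve_pt1 data steps → D_solve_pt1 data steps →
  solve_pt1 data steps ≠ solve_pt1_alt data steps

-- ===== LEMMAS AND PROOFS =====

-- in-bounds cells of the h×w grid
def pvInB (h w : Int) (p : Int × Int) : Prop := 0 ≤ p.1 ∧ p.1 < h ∧ 0 ≤ p.2 ∧ p.2 < w

-- the condition under which A's step inserts a cell
def pvOkA (data : List String) (h w : Int) (x : Int × Int) : Prop :=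
  0 ≤ x.1 ∧ x.1 < h ∧ 0 ≤ x.2 ∧ x.2 < w ∧
  PySem.Str.pyGet? (PySem.List.pyGetD data x.1 "") x.2 ≠ some '#'

-- B's dense-grid image of a set of cells
def pvMk (h w : Int) (q : List (Int × Int)) : List (List Bool) :=
  (PySem.List.pyRange 0 h 1).map (fun r =>
    (PySem.List.pyRange 0 w 1).map (fun c => decide ((r, c) ∈ q)))

theorem mem_inner_fold (data : List String) (h w : Int) (ds : List (Int × Int))
    (p : Int × Int) (acc : PySem.Set (Int × Int)) (x : Int × Int) :
    (x ∈ ds.foldl (fun nxt d =>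
      if 0 ≤ p.1 + d.1 ∧ p.1 + d.1 < h ∧ 0 ≤ p.2 + d.2 ∧ p.2 + d.2 < w ∧
         PySem.Str.pyGet? (PySem.List.pyGetD data (p.1 + d.1) "") (p.2 + d.2) ≠ some '#'
      then PySem.Set.add nxt (p.1 + d.1, p.2 + d.2) else nxt) acc) ↔
    x ∈ acc ∨ ∃ d ∈ ds, x = (p.1 + d.1, p.2 + d.2) ∧ pvOkA data h w x := by
  induction ds generalizing acc with
  | nil => simp
  | cons d rest ih =>
    simp only [List.foldl_cons]
    by_cases hc : 0 ≤ p.1 + d.1 ∧ p.1 + d.1 < h ∧ 0 ≤ p.2 + d.2 ∧ p.2 + d.2 < w ∧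
         PySem.Str.pyGet? (PySem.List.pyGetD data (p.1 + d.1) "") (p.2 + d.2) ≠ some '#'
    · rw [if_pos hc, ih]
      simp only [PySem.Set.mem_add, List.mem_cons]
      constructor
      · rintro ((hx | hx) | ⟨d', hd', he, hok⟩)
        · exact Or.inl hx
        · exact Or.inr ⟨d, Or.inl rfl, hx, by rw [hx]; exact hc⟩
        · exact Or.inr ⟨d', Or.inr hd', he, hok⟩
      · rintro (hx | ⟨d', (rfl | hd'), he, hok⟩)
        · exact Or.inl (Or.inl hx)
        · exact Or.inl (Or.inr he)
        · exact Or.inr ⟨d', hd', he, hok⟩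
    · rw [if_neg hc, ih]
      simp only [List.mem_cons]
      constructor
      · rintro (hx | ⟨d', hd', he, hok⟩)
        · exact Or.inl hx
        · exact Or.inr ⟨d', Or.inr hd', he, hok⟩
      · rintro (hx | ⟨d', (rfl | hd'), he, hok⟩)
        · exact Or.inl hx
        · exact absurd (by rw [he] at hok; simpa [pvOkA] using hok) hc
        · exact Or.inr ⟨d', hd', he, hok⟩

theorem mem_outer_fold (data : List String) (h w : Int) (l : List (Int × Int))
    (acc : PySem.Set (Int × Int)) (x : Int × Int) :
    (x ∈ l.foldl (fun nxt p =>
      pvDirs.foldl (fun nxt d =>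
        if 0 ≤ p.1 + d.1 ∧ p.1 + d.1 < h ∧ 0 ≤ p.2 + d.2 ∧ p.2 + d.2 < w ∧
           PySem.Str.pyGet? (PySem.List.pyGetD data (p.1 + d.1) "") (p.2 + d.2) ≠ some '#'
        then PySem.Set.add nxt (p.1 + d.1, p.2 + d.2) else nxt) nxt) acc) ↔
    x ∈ acc ∨ ∃ p ∈ l, ∃ d ∈ pvDirs, x = (p.1 + d.1, p.2 + d.2) ∧ pvOkA data h w x := by
  induction l generalizing acc with
  | nil => simp
  | cons p rest ih =>
    simp only [List.foldl_cons]
    rw [ih, mem_inner_fold]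
    constructor
    · rintro ((hx | hx) | ⟨p', hp', hrest⟩)
      · exact Or.inl hx
      · exact Or.inr ⟨p, List.mem_cons_self, hx⟩
      · exact Or.inr ⟨p', List.mem_cons_of_mem _ hp', hrest⟩
    · rintro (hx | ⟨p', hp', hrest⟩)
      · exact Or.inl (Or.inl hx)
      · rcases List.mem_cons.mp hp' with rfl | hp'
        · exact Or.inl (Or.inr hrest)
        · exact Or.inr ⟨p', hp', hrest⟩

theorem mem_stepA (data : List String) (h w : Int) (q : PySem.Set (Int × Int)) (x : Int × Int) :
    x ∈ pvStepA data h w q ↔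
    ∃ p ∈ q, ∃ d ∈ pvDirs, x = (p.1 + d.1, p.2 + d.2) ∧ pvOkA data h w x := by
  unfold pvStepA
  rw [mem_outer_fold]
  simp [PySem.Set.empty]

theorem nodup_inner_fold (data : List String) (h w : Int) (ds : List (Int × Int))
    (p : Int × Int) (acc : PySem.Set (Int × Int)) (hacc : acc.Nodup) :
    (ds.foldl (fun nxt d =>
      if 0 ≤ p.1 + d.1 ∧ p.1 + d.1 < h ∧ 0 ≤ p.2 + d.2 ∧ p.2 + d.2 < w ∧
         PySem.Str.pyGet? (PySem.List.pyGetD data (p.1 + d.1) "") (p.2 + d.2) ≠ some '#'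
      then PySem.Set.add nxt (p.1 + d.1, p.2 + d.2) else nxt) acc).Nodup := by
  induction ds generalizing acc with
  | nil => exact hacc
  | cons d rest ih =>
    simp only [List.foldl_cons]
    split
    · exact ih _ (PySem.Set.nodup_add _ _ hacc)
    · exact ih _ hacc

theorem nodup_stepA (data : List String) (h w : Int) (q : PySem.Set (Int × Int)) :
    (pvStepA data h w q).Nodup := by
  unfold pvStepA
  have main : ∀ (l : List (Int × Int)) (acc : PySem.Set (Int × Int)), acc.Nodup →
      (l.foldl (fun nxt p =>
        pvDirs.foldl (fun nxt d =>
          if 0 ≤ p.1 + d.1 ∧ p.1 + d.1 < h ∧ 0 ≤ p.2 + d.2 ∧ p.2 + d.2 < w ∧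
             PySem.Str.pyGet? (PySem.List.pyGetD data (p.1 + d.1) "") (p.2 + d.2) ≠ some '#'
          then PySem.Set.add nxt (p.1 + d.1, p.2 + d.2) else nxt) nxt) acc).Nodup := by
    intro l
    induction l with
    | nil => exact fun acc hacc => hacc
    | cons p rest ih => exact fun acc hacc => ih _ (nodup_inner_fold data h w pvDirs p acc hacc)
  exact main q _ List.nodup_nil

theorem inB_stepA (data : List String) (h w : Int) (q : PySem.Set (Int × Int)) :
    ∀ x ∈ pvStepA data h w q, pvInB h w x := by
  intro x hx
  rcases (mem_stepA data h w q x).mp hx with ⟨p, _, d, _, _, hok⟩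
  exact ⟨hok.1, hok.2.1, hok.2.2.1, hok.2.2.2.1⟩

-- the neighbour enumeration: membership in A's step at a fixed cell
theorem mem_stepA_iff (data : List String) (h w : Int) (q : PySem.Set (Int × Int))
    (r c : Int) :
    ((r, c) ∈ pvStepA data h w q ↔
      pvOkA data h w (r, c) ∧
      ((r - 1, c) ∈ q ∨ (r + 1, c) ∈ q ∨ (r, c - 1) ∈ q ∨ (r, c + 1) ∈ q)) := by
  rw [mem_stepA]
  constructor
  · rintro ⟨p, hp, d, hd, he, hok⟩
    rw [Prod.ext_iff] at he
    simp only at he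
    refine ⟨hok, ?_⟩
    fin_cases hd <;> simp only at he
    · exact Or.inr (Or.inl (show (r + 1, c) ∈ q from by
        have : p = (r + 1, c) := Prod.ext_iff.mpr ⟨by omega, by omega⟩
        rwa [← this]))
    · exact Or.inl (show (r - 1, c) ∈ q from by
        have : p = (r - 1, c) := Prod.ext_iff.mpr ⟨by omega, by omega⟩
        rwa [← this])
    · exact Or.inr (Or.inr (Or.inr (show (r, c + 1) ∈ q from by
        have : p = (r, c + 1) := Prod.ext_iff.mpr ⟨by omega, by omega⟩
        rwa [← this])))
    · exact Or.inr (Or.inr (Or.inl (show (r, c - 1) ∈ q from by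
        have : p = (r, c - 1) := Prod.ext_iff.mpr ⟨by omega, by omega⟩
        rwa [← this])))
  · rintro ⟨hok, (hm | hm | hm | hm)⟩
    · exact ⟨(r - 1, c), hm, (1, 0), by simp [pvDirs], Prod.ext_iff.mpr ⟨by simp, by simp⟩, hok⟩
    · exact ⟨(r + 1, c), hm, (-1, 0), by simp [pvDirs], Prod.ext_iff.mpr ⟨by simp, by simp⟩, hok⟩
    · exact ⟨(r, c - 1), hm, (0, 1), by simp [pvDirs], Prod.ext_iff.mpr ⟨by simp, by simp⟩, hok⟩
    · exact ⟨(r, c + 1), hm, (0, -1), by simp [pvDirs], Prod.ext_iff.mpr ⟨by simp, by simp⟩, hok⟩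

-- the cell character seen by both ports, for an in-range cell of a long-enough row
theorem cell_char (data : List String) (w r c : Int) (hc : 0 ≤ c) (hcw : c < w)
    (hlen : w.toNat ≤ (PySem.List.pyGetD data r "").toList.length) :
    PySem.Str.pyGet? (PySem.List.pyGetD data r "") c =
      some (PySem.List.pyGetD
        (PySem.List.pyGetD (data.map (fun row => row.toList.take w.toNat)) r []) c ' ') := by
  have hmap := PySem.List.pyGetD_map (fun row => row.toList.take w.toNat) data r ""
  simp only [String.toList_empty, List.take_nil] at hmap
  rw [hmap]
  set l := (PySem.List.pyGetD data r "").toList with hl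
  have hcn : c.toNat < w.toNat := by omega
  have hcl : c.toNat < l.length := by omega
  rw [PySem.List.pyGetD_of_nonneg _ _ hc]
  rw [show c = ((c.toNat : Nat) : Int) by omega, PySem.Str.pyGet?_natCast]
  simp only [List.getD_eq_getElem?_getD, List.getElem?_take, Int.toNat_natCast]
  rw [if_pos hcn, List.getElem?_eq_getElem hcl]
  simp

-- reading B's dense grid at an in-range position
theorem mk_cell (h w : Int) (q : List (Int × Int)) (r c : Int)
    (hr : 0 ≤ r) (hrh : r < h) (hc : 0 ≤ c) (hcw : c < w) :
    PySem.List.pyGetD (PySem.List.pyGetD (pvMk h w q) r []) c false = decide ((r, c) ∈ q) := by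
  unfold pvMk
  rw [PySem.List.pyGetD_map_pyRange_of_nonneg _ _ _ _ hr hrh]
  rw [PySem.List.pyGetD_map_pyRange_of_nonneg _ _ _ _ hc hcw]

-- one step of B on the image of q is the image of one step of A
theorem stepB_mk (data : List String) (h w : Int) (q : PySem.Set (Int × Int))
    (hh : h = (data.length : Int))
    (hq : ∀ p ∈ q, pvInB h w p)
    (hlen : ∀ s ∈ data, w.toNat ≤ s.toList.length) :
    pvStepB (data.map (fun row => row.toList.take w.toNat)) h w (pvMk h w q) =
      pvMk h w (pvStepA data h w q) := by
  unfold pvStepB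
  conv_rhs => unfold pvMk
  refine List.map_congr_left ?_
  intro r hrmem
  rw [PySem.List.mem_pyRange_one] at hrmem
  obtain ⟨hr, hrh⟩ := hrmem
  refine List.map_congr_left ?_
  intro c hcmem
  rw [PySem.List.mem_pyRange_one] at hcmem
  obtain ⟨hc, hcw⟩ := hcmem
  have hrow : (PySem.List.pyGetD data r "") ∈ data := by
    rw [PySem.List.pyGetD_of_nonneg _ _ hr, List.getD_eq_getElem?_getD,
      List.getElem?_eq_getElem (by omega), Option.getD_some]
    exact List.getElem_mem _
  have hchar := cell_char data w r c hc hcw (hlen _ hrow)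
  have e1 : (decide (0 < r) && PySem.List.pyGetD (PySem.List.pyGetD (pvMk h w q) (r - 1) []) c false)
      = decide ((r - 1, c) ∈ q) := by
    by_cases h1 : 0 < r
    · rw [mk_cell h w q (r - 1) c (by omega) (by omega) hc hcw]
      simp [h1]
    · have : ¬ ((r - 1, c) ∈ q) := fun hm => by have := hq _ hm; simp [pvInB] at this; omega
      simp [h1, this]
  have e2 : (decide (r + 1 < h) && PySem.List.pyGetD (PySem.List.pyGetD (pvMk h w q) (r + 1) []) c false)
      = decide ((r + 1, c) ∈ q) := by
    by_cases h1 : r + 1 < h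
    · rw [mk_cell h w q (r + 1) c (by omega) h1 hc hcw]
      simp [h1]
    · have : ¬ ((r + 1, c) ∈ q) := fun hm => by have := hq _ hm; simp [pvInB] at this; omega
      simp [h1, this]
  have e3 : (decide (0 < c) && PySem.List.pyGetD (PySem.List.pyGetD (pvMk h w q) r []) (c - 1) false)
      = decide ((r, c - 1) ∈ q) := by
    by_cases h1 : 0 < c
    · rw [mk_cell h w q r (c - 1) hr hrh (by omega) (by omega)]
      simp [h1]
    · have : ¬ ((r, c - 1) ∈ q) := fun hm => by have := hq _ hm; simp [pvInB] at this; omega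
      simp [h1, this]
  have e4 : (decide (c + 1 < w) && PySem.List.pyGetD (PySem.List.pyGetD (pvMk h w q) r []) (c + 1) false)
      = decide ((r, c + 1) ∈ q) := by
    by_cases h1 : c + 1 < w
    · rw [mk_cell h w q r (c + 1) hr hrh (by omega) h1]
      simp [h1]
    · have : ¬ ((r, c + 1) ∈ q) := fun hm => by have := hq _ hm; simp [pvInB] at this; omega
      simp [h1, this]
  rw [e1, e2, e3, e4]
  rw [Bool.eq_iff_iff]
  simp only [Bool.and_eq_true, Bool.or_eq_true, decide_eq_true_eq, bne_iff_ne, ne_eq]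
  rw [mem_stepA_iff]
  unfold pvOkA
  constructor
  · rintro ⟨hch, hnb⟩
    refine ⟨⟨hr, hrh, hc, hcw, by rw [hchar]; simpa using hch⟩, by tauto⟩
  · rintro ⟨⟨_, _, _, _, hch⟩, hnb⟩
    rw [hchar] at hch
    refine ⟨by simpa using hch, by tauto⟩

-- ---------- counting ----------

def pvCells (h w : Int) : List (Int × Int) :=
  (PySem.List.pyRange 0 h 1).flatMap (fun r => (PySem.List.pyRange 0 w 1).map (fun c => (r, c)))

theorem mem_cells (h w : Int) (x : Int × Int) : x ∈ pvCells h w ↔ pvInB h w x := by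
  unfold pvCells pvInB
  simp only [List.mem_flatMap, List.mem_map, PySem.List.mem_pyRange_one]
  constructor
  · rintro ⟨r, ⟨hr1, hr2⟩, c, ⟨hc1, hc2⟩, rfl⟩
    exact ⟨hr1, hr2, hc1, hc2⟩
  · rintro ⟨h1, h2, h3, h4⟩
    exact ⟨x.1, ⟨h1, h2⟩, x.2, ⟨h3, h4⟩, rfl⟩

theorem nodup_flat_rows (w : Int) (rs : List Int) (hrs : rs.Nodup) :
    (rs.flatMap (fun r => (PySem.List.pyRange 0 w 1).map (fun c => ((r : Int), c)))).Nodup := by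
  induction rs with
  | nil => simp
  | cons r rest ih =>
    rcases List.nodup_cons.mp hrs with ⟨hnr, hrest⟩
    simp only [List.flatMap_cons]
    rw [List.nodup_append]
    refine ⟨List.Nodup.map ?_ (PySem.List.nodup_pyRange_one 0 w), ih hrest, ?_⟩
    · intro a b hab
      simpa using congrArg Prod.snd hab
    · intro a ha b hb hne
      rcases List.mem_map.mp ha with ⟨ca, _, rfl⟩
      rcases List.mem_flatMap.mp hb with ⟨r', hr', hb'⟩
      rcases List.mem_map.mp hb' with ⟨cb, _, rfl⟩
      have : r = r' := congrArg Prod.fst hne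
      exact hnr (this ▸ hr')

theorem nodup_cells (h w : Int) : (pvCells h w).Nodup :=
  nodup_flat_rows w _ (PySem.List.nodup_pyRange_one 0 h)

theorem sum_rows_countP (w : Int) (q : List (Int × Int)) (rs : List Int) :
    ((rs.map (fun r =>
      (((PySem.List.pyRange 0 w 1).map (fun c => decide ((r, c) ∈ q))).count true : Int))).sum) =
    ((rs.flatMap (fun r => (PySem.List.pyRange 0 w 1).map (fun c => ((r : Int), c)))).countP
      (fun x => decide (x ∈ q)) : Int) := by
  induction rs with
  | nil => simp
  | cons r rest ih =>
    simp only [List.map_cons, List.sum_cons, List.flatMap_cons, List.countP_append]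
    rw [ih]
    have : (((PySem.List.pyRange 0 w 1).map (fun c => decide ((r, c) ∈ q))).count true) =
        (((PySem.List.pyRange 0 w 1).map (fun c => ((r : Int), c))).countP (fun x => decide (x ∈ q))) := by
      rw [List.count_eq_countP, List.countP_map, List.countP_map]
      apply List.countP_congr
      intro c _
      simp
    rw [this]
    push_cast
    ring

theorem len_eq_countP (h w : Int) (q : List (Int × Int)) (hn : q.Nodup)
    (hb : ∀ p ∈ q, pvInB h w p) :
    (pvCells h w).countP (fun x => decide (x ∈ q)) = q.length := by
  rw [List.countP_eq_length_filter]
  apply List.Perm.length_eq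
  rw [List.perm_ext_iff_of_nodup (List.Nodup.filter _ (nodup_cells h w)) hn]
  intro a
  simp only [List.mem_filter, decide_eq_true_eq, mem_cells]
  exact ⟨fun ⟨_, hq⟩ => hq, fun hq => ⟨hb a hq, hq⟩⟩

theorem count_total (h w : Int) (q : List (Int × Int)) (hn : q.Nodup)
    (hb : ∀ p ∈ q, pvInB h w p) :
    ((pvMk h w q).map (fun row => (row.count true : Int))).sum = (q.length : Int) := by
  unfold pvMk
  rw [List.map_map]
  have := sum_rows_countP w q (PySem.List.pyRange 0 h 1)
  simp only [Function.comp_def] at this ⊢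
  rw [this]
  rw [show (PySem.List.pyRange 0 h 1).flatMap
      (fun r => (PySem.List.pyRange 0 w 1).map (fun c => ((r : Int), c))) = pvCells h w from rfl]
  rw [len_eq_countP h w q hn hb]

-- ---------- the start-cell scan ----------

theorem singleton_prefix_iff (a : Char) (l : List Char) : [a] <+: l ↔ l.head? = some a := by
  cases l with
  | nil => simp
  | cons x t => simp [List.cons_prefix_cons, eq_comm]

theorem find_char_none (t : List Char) (a : Char) (hf : PySem.Chars.find t [a] = -1) :
    ∀ i : Nat, t[i]? ≠ some a := by
  intro i hi
  rw [PySem.Chars.find_eq_neg_one_iff, List.singleton_infix_iff] at hf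
  exact hf (List.mem_of_getElem? hi)

theorem find_char_found (t : List Char) (a : Char) (hf : 0 ≤ PySem.Chars.find t [a]) :
    (PySem.Chars.find t [a]).toNat < t.length ∧
    t[(PySem.Chars.find t [a]).toNat]? = some a ∧
    ∀ i < (PySem.Chars.find t [a]).toNat, t[i]? ≠ some a := by
  obtain ⟨hpre, hmin⟩ := PySem.Chars.find_spec hf
  rw [singleton_prefix_iff, List.head?_drop] at hpre
  refine ⟨?_, hpre, ?_⟩
  · by_contra hle
    rw [List.getElem?_eq_none (by omega)] at hpre
    simp at hpre
  · intro i hi hsome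
    apply hmin i hi
    rw [singleton_prefix_iff, List.head?_drop]
    exact hsome

theorem scan_miss (data : List String) (r : Int) (cs : List Int) (st : Int × Int)
    (hm : ∀ c ∈ cs, PySem.Str.pyGet? (PySem.List.pyGetD data r "") c ≠ some 'S') :
    pvScanRowA data r cs st = st := by
  induction cs with
  | nil => rfl
  | cons c rest ih =>
    unfold pvScanRowA
    rw [if_neg (hm c List.mem_cons_self)]
    exact ih (fun c' hc' => hm c' (List.mem_cons_of_mem _ hc'))

theorem scan_hit (data : List String) (r : Int) (l1 : List Int) (c : Int) (l2 : List Int)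
    (st : Int × Int)
    (hm : ∀ x ∈ l1, PySem.Str.pyGet? (PySem.List.pyGetD data r "") x ≠ some 'S')
    (hhit : PySem.Str.pyGet? (PySem.List.pyGetD data r "") c = some 'S') :
    pvScanRowA data r (l1 ++ c :: l2) st = (r, c) := by
  induction l1 with
  | nil => rw [List.nil_append]; unfold pvScanRowA; rw [if_pos hhit]
  | cons x rest ih =>
    rw [List.cons_append]
    unfold pvScanRowA
    rw [if_neg (hm x List.mem_cons_self)]
    exact ih (fun x' hx' => hm x' (List.mem_cons_of_mem _ hx'))

-- the char A reads at column c is the char of B's truncated row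
theorem look_eq_take (data : List String) (w r c : Int) (hc : 0 ≤ c) (hcw : c < w) :
    PySem.Str.pyGet? (PySem.List.pyGetD data r "") c =
      ((PySem.List.pyGetD data r "").toList.take w.toNat)[c.toNat]? := by
  rw [show c = ((c.toNat : Nat) : Int) by omega, PySem.Str.pyGet?_natCast]
  rw [List.getElem?_take, if_pos (by omega)]
  simp
  rw [show max c 0 = c from by omega]

theorem scan_row_eq (data : List String) (w r : Int) (st : Int × Int)
    (hlen : w.toNat ≤ (PySem.List.pyGetD data r "").toList.length) :
    pvScanRowA data r (PySem.List.pyRange 0 w 1) st =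
      (if PySem.Chars.find
            (PySem.List.pyGetD (data.map (fun row => row.toList.take w.toNat)) r []) ['S'] ≠ -1
       then (r, PySem.Chars.find
            (PySem.List.pyGetD (data.map (fun row => row.toList.take w.toNat)) r []) ['S'])
       else st) := by
  have hmap := PySem.List.pyGetD_map (fun row => row.toList.take w.toNat) data r ""
  simp only [String.toList_empty, List.take_nil] at hmap
  rw [hmap]
  set t := (PySem.List.pyGetD data r "").toList.take w.toNat with ht
  have htlen : t.length = w.toNat := by rw [ht, List.length_take]; omega
  by_cases hf : PySem.Chars.find t ['S'] = -1
  · rw [if_neg (by simp [hf])]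
    apply scan_miss
    intro c hcmem
    rw [PySem.List.mem_pyRange_one] at hcmem
    rw [look_eq_take data w r c hcmem.1 hcmem.2, ← ht]
    exact find_char_none t 'S' hf c.toNat
  · have hf0 : 0 ≤ PySem.Chars.find t ['S'] := by
      have := PySem.Chars.neg_one_le_find t ['S']
      omega
    obtain ⟨hlt, hgot, hmiss⟩ := find_char_found t 'S' hf0
    set k := PySem.Chars.find t ['S'] with hk
    have hkw : k < w := by omega
    rw [if_pos hf]
    rw [PySem.List.pyRange_one_append 0 k w hf0 (by omega),
        PySem.List.pyRange_one_cons hkw]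
    apply scan_hit
    · intro x hx
      rw [PySem.List.mem_pyRange_one] at hx
      rw [look_eq_take data w r x hx.1 (by omega), ← ht]
      exact hmiss x.toNat (by omega)
    · rw [look_eq_take data w r k hf0 hkw, ← ht]
      exact hgot

-- bounds of B's scan result
theorem scan_bounds (data : List String) (h w : Int) (rs : List Int) (st : Int × Int)
    (hrs : ∀ r ∈ rs, 0 ≤ r ∧ r < h) (hst : pvInB h w st) :
    pvInB h w (rs.foldl (fun st r =>
      let c := PySem.Chars.find
        (PySem.List.pyGetD (data.map (fun row => row.toList.take w.toNat)) r []) ['S']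
      if c ≠ -1 then (r, c) else st) st) := by
  induction rs generalizing st with
  | nil => exact hst
  | cons r rest ih =>
    simp only [List.foldl_cons]
    refine ih _ (fun r' hr' => hrs r' (List.mem_cons_of_mem _ hr')) ?_
    dsimp only
    have hmap := PySem.List.pyGetD_map (fun row => row.toList.take w.toNat) data r ""
    simp only [String.toList_empty, List.take_nil] at hmap
    set t := PySem.List.pyGetD (data.map (fun row => row.toList.take w.toNat)) r [] with ht
    by_cases hf : PySem.Chars.find t ['S'] = -1
    · simp only [ne_eq, hf, not_true_eq_false, if_false]
      exact hst
    · have hf0 : 0 ≤ PySem.Chars.find t ['S'] := by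
        have := PySem.Chars.neg_one_le_find t ['S']
        omega
      obtain ⟨hlt, _, _⟩ := find_char_found t 'S' hf0
      have htw : t.length ≤ w.toNat := by
        rw [hmap, List.length_take]
        omega
      have hr0 : 0 ≤ r ∧ r < h := hrs r List.mem_cons_self
      simp only [ne_eq, hf, not_false_eq_true, if_true]
      exact ⟨hr0.1, hr0.2, hf0, by omega⟩

-- ---------- the step loop ----------

theorem loop_inv (data : List String) (h w : Int) (hh : h = (data.length : Int))
    (hlen : ∀ s ∈ data, w.toNat ≤ s.toList.length) :
    ∀ (l : List Int) (q : PySem.Set (Int × Int)), q.Nodup → (∀ p ∈ q, pvInB h w p) →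
      (l.foldl (fun cur _ => pvStepB (data.map (fun row => row.toList.take w.toNat)) h w cur)
        (pvMk h w q) = pvMk h w (l.foldl (fun q _ => pvStepA data h w q) q)) ∧
      (l.foldl (fun q _ => pvStepA data h w q) q).Nodup ∧
      (∀ p ∈ l.foldl (fun q _ => pvStepA data h w q) q, pvInB h w p) := by
  intro l
  induction l with
  | nil => exact fun q hn hb => ⟨rfl, hn, hb⟩
  | cons a rest ih =>
    intro q hn hb
    simp only [List.foldl_cons]
    rw [stepB_mk data h w q hh hb hlen]
    exact ih _ (nodup_stepA data h w q) (inB_stepA data h w q)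

-- ---------- the zero-width grid ----------

theorem stepA_w0 (data : List String) (h : Int) (q : PySem.Set (Int × Int)) :
    pvStepA data h 0 q = [] := by
  rw [List.eq_nil_iff_forall_not_mem]
  intro x hx
  rcases (mem_stepA data h 0 q x).mp hx with ⟨p, _, d, _, _, hok⟩
  unfold pvOkA at hok
  omega

theorem foldA_w0 (data : List String) (h : Int) (l : List Int) :
    l.foldl (fun q _ => pvStepA data h 0 q) [] = [] := by
  induction l with
  | nil => rfl
  | cons a rest ih =>
    simp only [List.foldl_cons]
    rw [show pvStepA data h 0 [] = [] from rfl]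
    exact ih

theorem stepB_w0 (grid : List (List Char)) (h : Int) (cur : List (List Bool)) :
    pvStepB grid h 0 cur = (PySem.List.pyRange 0 h 1).map (fun _ => []) := by
  unfold pvStepB
  simp [PySem.List.pyRange_one_eq_nil (le_refl (0 : Int))]

theorem foldB_w0 (grid : List (List Char)) (h : Int) (l : List Int) :
    l.foldl (fun cur _ => pvStepB grid h 0 cur)
      ((PySem.List.pyRange 0 h 1).map (fun _ => ([] : List Bool))) =
      (PySem.List.pyRange 0 h 1).map (fun _ => []) := by
  induction l with
  | nil => rfl
  | cons a rest ih =>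
    simp only [List.foldl_cons]
    rw [stepB_w0]
    exact ih

theorem row_mem (data : List String) (r : Int) (hr : 0 ≤ r) (hrh : r < (data.length : Int)) :
    PySem.List.pyGetD data r "" ∈ data := by
  rw [PySem.List.pyGetD_of_nonneg _ _ hr, List.getD_eq_getElem?_getD,
    List.getElem?_eq_getElem (by omega), Option.getD_some]
  exact List.getElem_mem _

-- the two ports agree whenever the grid is not the degenerate zero-width one with steps ≤ 0
theorem main_eq (data : List String) (steps : Int) (hne : data ≠ [])
    (hlen0 : ∀ s ∈ data, (PySem.List.pyGetD data 0 "").toList.length ≤ s.toList.length)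
    (hnz : (PySem.List.pyGetD data 0 "").toList.length ≠ 0 ∨ 0 < steps) :
    solve_pt1 data steps = solve_pt1_alt data steps := by
  have hH1 : (1 : Int) ≤ (data.length : Int) := by
    have := List.length_pos_of_ne_nil hne
    omega
  have hlen' : ∀ s ∈ data,
      ((((PySem.List.pyGetD data 0 "").toList.length : Nat) : Int)).toNat ≤ s.toList.length := by
    intro s hs
    have := hlen0 s hs
    omega
  unfold solve_pt1 solve_pt1_alt
  dsimp only
  rw [PySem.Str.len_eq]
  by_cases hw0 : (PySem.List.pyGetD data 0 "").toList.length = 0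
  · -- zero-width grid: both sides are 0 after the first (mandatory) step
    have hsteps : 0 < steps := by
      rcases hnz with hnz | hnz
      · exact absurd hw0 hnz
      · exact hnz
    rw [hw0, Nat.cast_zero]
    rw [PySem.List.pyRange_one_cons (a := 0) (b := steps) hsteps]
    simp only [List.foldl_cons]
    rw [stepA_w0, foldA_w0]
    rw [PySem.List.pyRange_one_eq_nil (a := 0) (b := 0) (le_refl 0)]
    simp only [List.map_nil]
    rw [stepB_w0, foldB_w0]
    simp [PySem.Set.len]
  · -- positive width: the boolean grid mirrors A's set throughout
    have hW1 : (1 : Int) ≤ (((PySem.List.pyGetD data 0 "").toList.length : Nat) : Int) := by omega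
    have hscan : (PySem.List.pyRange 0 (data.length : Int) 1).foldl
        (fun st r => pvScanRowA data r
          (PySem.List.pyRange 0 (((PySem.List.pyGetD data 0 "").toList.length : Nat) : Int) 1) st)
        ((0 : Int), (0 : Int)) =
        (PySem.List.pyRange 0 (data.length : Int) 1).foldl (fun st r =>
          let c := PySem.Chars.find
            (PySem.List.pyGetD (data.map (fun row =>
              row.toList.take ((((PySem.List.pyGetD data 0 "").toList.length : Nat) : Int)).toNat)) r [])
            ['S']
          if c ≠ -1 then (r, c) else st) ((0 : Int), (0 : Int)) := by
      apply PySem.List.foldl_congr_mem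
      intro acc x hx
      rw [PySem.List.mem_pyRange_one] at hx
      exact scan_row_eq data _ x acc (hlen' _ (row_mem data x hx.1 hx.2))
    rw [hscan]
    set W : Int := (((PySem.List.pyGetD data 0 "").toList.length : Nat) : Int) with hWdef
    set st := (PySem.List.pyRange 0 (data.length : Int) 1).foldl (fun st r =>
          let c := PySem.Chars.find
            (PySem.List.pyGetD (data.map (fun row => row.toList.take W.toNat)) r []) ['S']
          if c ≠ -1 then (r, c) else st) ((0 : Int), (0 : Int)) with hstdef
    have hstB : pvInB (data.length : Int) W st := by
      rw [hstdef]
      apply scan_bounds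
      · intro r hr
        rw [PySem.List.mem_pyRange_one] at hr
        exact hr
      · exact ⟨le_refl 0, by omega, le_refl 0, by omega⟩
    rw [show PySem.Set.add PySem.Set.empty st = [st] from rfl]
    have hcur0 : (PySem.List.pyRange 0 (data.length : Int) 1).map (fun r =>
        (PySem.List.pyRange 0 W 1).map (fun c => decide (r = st.1 ∧ c = st.2))) =
        pvMk (data.length : Int) W [st] := by
      unfold pvMk
      refine List.map_congr_left fun r _ => List.map_congr_left fun c _ => ?_
      rw [decide_eq_decide]
      simp [Prod.ext_iff]
    rw [hcur0]
    obtain ⟨hfold, hnod, hbnd⟩ := loop_inv data (data.length : Int) W rfl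
      (by intro s hs; exact hlen' s hs) (PySem.List.pyRange 0 steps 1) [st]
      (List.nodup_singleton st)
      (by intro p hp; rw [List.mem_singleton] at hp; rw [hp]; exact hstB)
    rw [hfold, count_total (data.length : Int) W _ hnod hbnd]
    simp [PySem.Set.len]

-- ===== VERDICT (by name: the statement is the Claim_ definition above) =====
theorem solve_pt1_spec : Claim_unchanged_solve_pt1 := by
  intro data steps _ hpre
  unfold Spec_solve_pt1
  intro hnD
  unfold D_solve_pt1 at hnD
  refine main_eq data steps hpre.1 hpre.2 ?_
  by_cases h0 : (PySem.List.pyGetD data 0 "").toList.length = 0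
  · exact Or.inr (by by_contra hle; exact hnD ⟨h0, by omega⟩)
  · exact Or.inl h0

theorem solve_pt1_changed : Claim_changed_solve_pt1 := by unfold Claim_changed_solve_pt1; decide

theorem solve_pt1_tight : Claim_exact_solve_pt1 := by
  intro data steps _ hpre hD
  obtain ⟨hw0, hsteps⟩ := hD
  unfold solve_pt1 solve_pt1_alt
  dsimp only
  rw [PySem.Str.len_eq, hw0, Nat.cast_zero]
  rw [PySem.List.pyRange_one_eq_nil (a := 0) (b := steps) hsteps]
  rw [PySem.List.pyRange_one_eq_nil (a := 0) (b := 0) (le_refl 0)]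
  simp only [List.foldl_nil, List.map_nil]
  simp [PySem.Set.len]
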